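-- pv_equiv track=rewrite | github.com/sjansenmesh/aoc24 | day_2/day_2_pt_1.py | determine_safety
-- ===== SOURCE A (Python) =====
-- def determine_safety(report):
--     status = 'safe'
--     direction = 'asc' if report[1] - report[0] >= 1 else 'desc'
--     for i in range(len(report) - 1):
--         diff = report[i+1] - report[i]
--         if direction == 'asc' and (diff <= 0 or diff > 3):
--             status = 'unsafe'
--             break
--         if direction == 'desc' and (diff >= 0 or diff < -3):
--             status = 'unsafe'
--             break
--     return status
-- ===== SOURCE B (Python) =====
-- def determine_safety(report):
--     diffs = [y - x for x, y in zip(report, report[1:])]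
--     if all(1 <= d <= 3 for d in diffs) or all(-3 <= d <= -1 for d in diffs):
--         return 'safe'
--     return 'unsafe'
-- ===== Notes on version B (the rewrite author's own statement) =====
-- stated objective: simpler
-- what changed: B drops A's direction variable and banded single pass with break: it builds the diff list once and returns 'safe' iff every diff is between 1 and 3 or every diff is between -3 and -1.
import Mathlib
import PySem

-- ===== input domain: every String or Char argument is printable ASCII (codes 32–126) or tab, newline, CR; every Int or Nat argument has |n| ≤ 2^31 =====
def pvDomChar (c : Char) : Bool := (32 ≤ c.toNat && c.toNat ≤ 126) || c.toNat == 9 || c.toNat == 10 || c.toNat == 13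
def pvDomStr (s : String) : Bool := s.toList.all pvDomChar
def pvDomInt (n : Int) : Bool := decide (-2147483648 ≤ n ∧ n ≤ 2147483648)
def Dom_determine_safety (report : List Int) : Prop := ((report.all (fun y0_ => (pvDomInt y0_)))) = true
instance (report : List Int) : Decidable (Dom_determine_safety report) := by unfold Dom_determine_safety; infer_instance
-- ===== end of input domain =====

-- B replaces A's direction variable and banded break-loop by one diff list tested against
-- the two legal bands; equivalence of the RETURN value is proved for reports of length ≥ 2
-- (A raises IndexError below that, see Raises_).

-- ===== PORT A =====
-- the for-loop with break, over range(len(report)-1), reading report[i], report[i+1]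
def detLoopA (report : List Int) (direction : String) : List Int → String
  | [] => "safe"
  | i :: rest =>
      let diff := PySem.List.pyGetD report (i + 1) 0 - PySem.List.pyGetD report i 0
      if direction = "asc" ∧ (diff ≤ 0 ∨ diff > 3) then "unsafe"
      else if direction = "desc" ∧ (diff ≥ 0 ∨ diff < -3) then "unsafe"
      else detLoopA report direction rest

def determine_safety (report : List Int) : String :=
  match PySem.List.pyGet? report 1, PySem.List.pyGet? report 0 with
  | some r1, some r0 =>
      let direction := if r1 - r0 ≥ 1 then "asc" else "desc"
      detLoopA report direction (PySem.List.pyRange 0 ((report.length : Int) - 1) 1)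
  | _, _ => ""   -- IndexError in Python: excluded by Pre_

-- ===== PORT B =====
def determine_safety_alt (report : List Int) : String :=
  let diffs := (report.zip report.tail).map (fun p => p.2 - p.1)
  if diffs.all (fun d => decide (1 ≤ d ∧ d ≤ 3)) || diffs.all (fun d => decide (-3 ≤ d ∧ d ≤ -1))
  then "safe" else "unsafe"

-- ===== PRECONDITION & SPEC =====
def Pre_determine_safety (report : List Int) : Prop := 2 ≤ report.length
instance (report : List Int) : Decidable (Pre_determine_safety report) := by
  unfold Pre_determine_safety; infer_instance

def pvWitness_determine_safety : List Int := [1, 3, 4]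

def Spec_determine_safety (report : List Int) (out : String) : Prop := out = determine_safety_alt report
instance (report : List Int) (out : String) : Decidable (Spec_determine_safety report out) := by
  unfold Spec_determine_safety; infer_instance

-- ===== CLAIM (what is proved, stated in full; the proofs are below) =====
def Claim_equal_determine_safety : Prop := ∀ (report : List Int), Dom_determine_safety report → Pre_determine_safety report → Spec_determine_safety report (determine_safety report)

-- ===== LEMMAS AND PROOFS =====

-- structural version of A's index loop: scan consecutive pairs
def scanA (direction : String) : List Int → String
  | x :: y :: rest =>
      let diff := y - x
      if direction = "asc" ∧ (diff ≤ 0 ∨ diff > 3) then "unsafe"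
      else if direction = "desc" ∧ (diff ≥ 0 ∨ diff < -3) then "unsafe"
      else scanA direction (y :: rest)
  | _ => "safe"

-- the diff list B builds
def diffsL (xs : List Int) : List Int := (xs.zip xs.tail).map (fun p => p.2 - p.1)

theorem diffsL_cons (x y : Int) (rest : List Int) :
    diffsL (x :: y :: rest) = (y - x) :: diffsL (y :: rest) := by
  simp [diffsL]

-- A's index loop from index k equals the structural scan of the suffix
theorem detLoopA_eq_scanA (report : List Int) (dir : String) :
    ∀ (n k : Nat), report.length - k ≤ n →
      detLoopA report dir (PySem.List.pyRange (k : Int) ((report.length : Int) - 1) 1)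
        = scanA dir (report.drop k) := by
  intro n
  induction n with
  | zero =>
      intro k hk
      have h1 : (report.length : Int) - 1 ≤ (k : Int) := by omega
      rw [PySem.List.pyRange_one_eq_nil h1]
      have : report.drop k = [] := List.drop_eq_nil_of_le (by omega)
      simp [detLoopA, this, scanA]
  | succ n ih =>
      intro k hk
      by_cases hklt : k + 1 < report.length
      · have hlt : (k : Int) < (report.length : Int) - 1 := by
          exact_mod_cast (by omega : (k : Int) < (report.length : Int) - 1)
        rw [PySem.List.pyRange_one_cons hlt]
        have hk1 : k < report.length := by omega
        have hd : report.drop k = report[k] :: report.drop (k + 1) :=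
          List.drop_eq_getElem_cons hk1
        have hd2 : report.drop (k + 1) = report[k + 1] :: report.drop (k + 2) :=
          List.drop_eq_getElem_cons hklt
        have hg1 : PySem.List.pyGetD report (((k + 1 : Nat) : Int)) 0 = report[k + 1] := by
          rw [PySem.List.pyGetD_natCast]
          simp [List.getD, hklt]
        have hg0 : PySem.List.pyGetD report (k : Int) 0 = report[k] := by
          rw [PySem.List.pyGetD_natCast]
          simp [List.getD, hk1]
        have hrec : ((k : Int) + 1) = ((k + 1 : Nat) : Int) := by push_cast; ring
        rw [hd, hd2]
        simp only [detLoopA, scanA, hrec, hg1, hg0]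
        split_ifs with h1 h2
        · rfl
        · rfl
        · rw [ih (k + 1) (by omega), hd2]
      · -- no iterations left / at most one element after k
        have h1 : (report.length : Int) - 1 ≤ (k : Int) := by
          exact_mod_cast (by omega : (report.length : Int) - 1 ≤ (k : Int))
        rw [PySem.List.pyRange_one_eq_nil h1]
        rcases Nat.lt_or_ge k report.length with hlt | hge
        · have : report.drop k = [report[k]] := by
            rw [List.drop_eq_getElem_cons hlt]
            congr 1
            exact List.drop_eq_nil_of_le (by omega)
          simp [detLoopA, this, scanA]
        · have : report.drop k = [] := List.drop_eq_nil_of_le hge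
          simp [detLoopA, this, scanA]

theorem scanA_cons (dir : String) (x y : Int) (rest : List Int) :
    scanA dir (x :: y :: rest)
      = (if dir = "asc" ∧ (y - x ≤ 0 ∨ y - x > 3) then "unsafe"
         else if dir = "desc" ∧ (y - x ≥ 0 ∨ y - x < -3) then "unsafe"
         else scanA dir (y :: rest)) := rfl

-- the ascending scan is B's first band test
theorem scanA_asc : ∀ (xs : List Int),
    scanA "asc" xs = if (diffsL xs).all (fun d => decide (1 ≤ d ∧ d ≤ 3)) then "safe" else "unsafe"
  | [] => by simp [scanA, diffsL]
  | [x] => by simp [scanA, diffsL]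
  | x :: y :: rest => by
      rw [diffsL_cons, scanA_cons, scanA_asc (y :: rest)]
      by_cases hb : 1 ≤ y - x ∧ y - x ≤ 3
      · rw [if_neg (by simp only [not_and]; intro _; omega),
            if_neg (by rintro ⟨h, _⟩; simp at h)]
        have hd : (decide (1 ≤ y - x ∧ y - x ≤ 3)) = true := by simp [hb.1, hb.2]
        simp only [List.all_cons, hd, Bool.true_and]
      · rw [if_pos ⟨rfl, by omega⟩]
        have hd : (decide (1 ≤ y - x ∧ y - x ≤ 3)) = false := by
          simp only [decide_eq_false_iff_not]; exact hb
        simp only [List.all_cons, hd, Bool.false_and]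
        rw [if_neg (by simp)]

-- the descending scan is B's second band test
theorem scanA_desc : ∀ (xs : List Int),
    scanA "desc" xs = if (diffsL xs).all (fun d => decide (-3 ≤ d ∧ d ≤ -1)) then "safe" else "unsafe"
  | [] => by simp [scanA, diffsL]
  | [x] => by simp [scanA, diffsL]
  | x :: y :: rest => by
      rw [diffsL_cons, scanA_cons, scanA_desc (y :: rest)]
      by_cases hb : -3 ≤ y - x ∧ y - x ≤ -1
      · rw [if_neg (by rintro ⟨h, _⟩; simp at h),
            if_neg (by simp only [not_and]; intro _; omega)]
        have hd : (decide (-3 ≤ y - x ∧ y - x ≤ -1)) = true := by simp [hb.1, hb.2]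
        simp only [List.all_cons, hd, Bool.true_and]
      · rw [if_neg (by rintro ⟨h, _⟩; simp at h), if_pos ⟨rfl, by omega⟩]
        have hd : (decide (-3 ≤ y - x ∧ y - x ≤ -1)) = false := by
          simp only [decide_eq_false_iff_not]; exact hb
        simp only [List.all_cons, hd, Bool.false_and]
        rw [if_neg (by simp)]

-- ===== VERDICT (by name: the statement is the Claim_ definition above) =====
theorem determine_safety_spec : Claim_equal_determine_safety := by
  intro report _ hpre
  unfold Spec_determine_safety
  obtain ⟨r0, r1, rest, rfl⟩ : ∃ r0 r1 rest, report = r0 :: r1 :: rest := by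
    match report, hpre with
    | r0 :: r1 :: rest, _ => exact ⟨r0, r1, rest, rfl⟩
  have hA : determine_safety (r0 :: r1 :: rest)
      = detLoopA (r0 :: r1 :: rest) (if r1 - r0 ≥ 1 then "asc" else "desc")
          (PySem.List.pyRange 0 (((r0 :: r1 :: rest).length : Int) - 1) 1) := by
    simp [determine_safety, PySem.List.pyGet?, PySem.List.pyIdx?,
      show (0:Int) ≤ (rest.length:Int) + 1 from by omega]
  have hloop := detLoopA_eq_scanA (r0 :: r1 :: rest)
      (if r1 - r0 ≥ 1 then "asc" else "desc") (r0 :: r1 :: rest).length 0 (by omega)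
  simp only [Nat.cast_zero, List.drop_zero] at hloop
  rw [hA, hloop]
  have hdiffs : diffsL (r0 :: r1 :: rest) = (r1 - r0) :: diffsL (r1 :: rest) := diffsL_cons r0 r1 rest
  have hBdiffs : ((r0 :: r1 :: rest).zip (r0 :: r1 :: rest).tail).map (fun p => p.2 - p.1)
      = diffsL (r0 :: r1 :: rest) := rfl
  by_cases hdir : r1 - r0 ≥ 1
  · -- ascending: the descending band is impossible on the first diff
    rw [if_pos hdir, scanA_asc]
    have hnd : ((diffsL (r0 :: r1 :: rest)).all (fun d => decide (-3 ≤ d ∧ d ≤ -1))) = false := by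
      rw [hdiffs]; simp only [List.all_cons, Bool.and_eq_false_iff]
      left; simp; omega
    simp only [determine_safety_alt, hBdiffs, hnd, Bool.or_false]
  · -- descending: the ascending band is impossible on the first diff
    rw [if_neg hdir, scanA_desc]
    have hna : ((diffsL (r0 :: r1 :: rest)).all (fun d => decide (1 ≤ d ∧ d ≤ 3))) = false := by
      rw [hdiffs]; simp only [List.all_cons, Bool.and_eq_false_iff]
      left; simp; omega
    simp only [determine_safety_alt, hBdiffs, hna, Bool.false_or]
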